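-- pv_equiv track=rewrite | github.com/melsita13/ai-lab-progs | constraintsatisfaction.py | schedule_subjects
-- ===== SOURCE A (Python) =====
-- subjects = ["maths", "phy", "che", "bio"]
--
-- days = ["Monday", "Tuesday"]
--
-- conflicts = [
--     ("maths", "phy"),  # Maths and Physics cannot be on the same day
--     ("che", "bio")     # Chemistry and Biology cannot be on the same day
-- ]
--
-- def schedule_subjects(assignment):
--     # Check if all subjects are assigned
--     if len(assignment) == len(subjects):
--         return assignment
--
--     # Select the next unassigned subject
--     for subject in subjects:
--         if subject not in assignment:
--             break
--
--     # Try assigning each day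
--     for day in days:
--         if is_valid_assignment(subject, day, assignment):
--             assignment[subject] = day
--             result = schedule_subjects(assignment)
--             if result:
--                 return result
--             assignment.pop(subject)  # backtrack if not successful
--
--     return None
--
-- def is_valid_assignment(subject, day, assignment):
--     # Check for conflicts with already assigned subjects
--     for (subj1, subj2) in conflicts:
--         if subject in (subj1, subj2):
--             other_subject = subj1 if subject == subj2 else subj2
--             if assignment.get(other_subject) == day:
--                 return False
--     return True
-- ===== SOURCE B (Python) =====
-- subjects = ["maths", "phy", "che", "bio"]
--
-- days = ["Monday", "Tuesday"]
--
-- conflicts = [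
--     ("maths", "phy"),
--     ("che", "bio")
-- ]
--
-- # each subject conflicts with at most one partner
-- PARTNER = {}
-- for _a, _b in conflicts:
--     PARTNER[_a] = _b
--     PARTNER[_b] = _a
--
--
-- def schedule_subjects(assignment):
--     # One greedy left-to-right pass: with two days and disjoint conflict
--     # pairs, the first day that differs from the partner's current day is
--     # always available, so no backtracking search is ever needed.
--     for s in subjects:
--         if len(assignment) == len(subjects):
--             break
--         if s in assignment:
--             continue
--         p = PARTNER[s]
--         for day in days:
--             if assignment.get(p) != day:
--                 assignment[s] = day
--                 break
--     return assignment if len(assignment) == len(subjects) else None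
-- ===== Notes on version B (the rewrite author's own statement) =====
-- stated objective: simpler
-- what changed: Replaces the recursive backtracking search (choose first unassigned subject, try each day, recurse, pop on failure) with a single greedy left-to-right pass over the subjects: since the conflict pairs are disjoint and there are two days, the first day differing from the partner's current day is always valid and backtracking never occurs, so B just assigns it; the dict is mutated in place and returned exactly as A does.
import Mathlib
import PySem

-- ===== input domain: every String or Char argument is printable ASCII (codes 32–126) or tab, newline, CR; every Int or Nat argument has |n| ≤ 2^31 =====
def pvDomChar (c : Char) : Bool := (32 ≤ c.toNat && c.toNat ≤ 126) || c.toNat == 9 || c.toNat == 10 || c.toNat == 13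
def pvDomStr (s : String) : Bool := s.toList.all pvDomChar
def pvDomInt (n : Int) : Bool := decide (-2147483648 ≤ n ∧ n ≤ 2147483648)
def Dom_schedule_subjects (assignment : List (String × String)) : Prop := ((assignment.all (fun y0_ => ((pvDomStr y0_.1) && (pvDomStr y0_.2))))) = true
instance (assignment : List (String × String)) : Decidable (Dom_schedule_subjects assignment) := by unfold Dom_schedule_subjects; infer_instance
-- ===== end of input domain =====

-- B replaces A's recursive backtracking with one greedy pass (no search is ever needed here);
-- both Pythons mutate the argument dict in place and return it — the equivalence proved is about the return value.

-- ===== PORT A =====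
def pvSubjects : List String := ["maths", "phy", "che", "bio"]
def pvDays : List String := ["Monday", "Tuesday"]
def pvConflicts : List (String × String) := [("maths", "phy"), ("che", "bio")]

-- is_valid_assignment: the early-return loop over conflicts is the conjunction over the list
def pvIsValid (subject day : String) (assignment : PySem.Dict String String) : Bool :=
  pvConflicts.all (fun c =>
    if subject == c.1 || subject == c.2 then
      !(assignment.get? (if subject == c.2 then c.1 else c.2) == some day)
    else true)

-- the 'for day in days' loop; 'assignment.pop(subject)' after a failed recursion is 'erase'
-- (the key was just inserted, so erase is exactly Python's pop here);
-- 'if result:' is 'some r with r non-empty'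
def pvTryDays (rec : PySem.Dict String String → Option (PySem.Dict String String))
    (subject : String) : List String → PySem.Dict String String → Option (PySem.Dict String String)
  | [], _ => none
  | day :: restDays, d =>
    if pvIsValid subject day d then
      let d' := d.insert subject day
      match rec d' with
      | some r => if r.size == 0 then pvTryDays rec subject restDays (d'.erase subject) else some r
      | none => pvTryDays rec subject restDays (d'.erase subject)
    else pvTryDays rec subject restDays d

-- schedule_subjects with a fuel argument making the recursion structural; inside Pre_ the
-- recursion depth is at most 5 (one level per missing subject plus the base), so fuel 10 is never exhausted.
-- 'for subject in subjects: if subject not in assignment: break' leaves subject = first unassigned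
-- subject, or the LAST subject "bio" when every subject is already assigned.
def pvScheduleA : Nat → PySem.Dict String String → Option (PySem.Dict String String)
  | 0, _ => none
  | n + 1, d =>
    if d.size == 4 then some d
    else
      pvTryDays (pvScheduleA n) ((pvSubjects.find? (fun s => !(d.contains s))).getD "bio") pvDays d

def schedule_subjects (assignment : List (String × String)) : Option (List (String × String)) :=
  (pvScheduleA 10 (PySem.Dict.mk assignment)).map (fun d => d.items)

-- ===== PORT B =====
def pvPartner : PySem.Dict String String :=
  PySem.Dict.mk [("maths", "phy"), ("phy", "maths"), ("che", "bio"), ("bio", "che")]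

-- the single 'for s in subjects' pass of Source B (break / continue become the branches)
def pvFill : PySem.Dict String String → List String → PySem.Dict String String
  | d, [] => d
  | d, s :: rest =>
    if d.size == 4 then d                -- 'if len(assignment) == len(subjects): break'
    else if d.contains s then pvFill d rest   -- 'if s in assignment: continue'
    else
      match pvDays.find? (fun day => !(d.get? (pvPartner.getD s "") == some day)) with
      | some day => pvFill (d.insert s day) rest   -- first fitting day, then 'break'
      | none => pvFill d rest

def schedule_subjects_alt (assignment : List (String × String)) : Option (List (String × String)) :=
  let d := pvFill (PySem.Dict.mk assignment) pvSubjects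
  if d.size == 4 then some d.items else none

-- ===== PRECONDITION & SPEC =====
-- Pre_ excludes association lists with duplicate keys (not representable as a Python dict) and
-- dicts with more than 4 entries, on which A never reaches the length-4 base case and raises RecursionError.
def Pre_schedule_subjects (assignment : List (String × String)) : Prop :=
  (assignment.map Prod.fst).Nodup ∧ assignment.length ≤ 4
instance (assignment : List (String × String)) : Decidable (Pre_schedule_subjects assignment) := by
  unfold Pre_schedule_subjects; infer_instance

def pvWitness_schedule_subjects : (List (String × String)) := [("phy", "Monday")]

def Spec_schedule_subjects (assignment : List (String × String)) (out : Option (List (String × String))) : Prop := out = schedule_subjects_alt assignment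
instance (assignment : List (String × String)) (out : Option (List (String × String))) : Decidable (Spec_schedule_subjects assignment out) := by unfold Spec_schedule_subjects; infer_instance

-- ===== CLAIM (what is proved, stated in full; the proofs are below) =====
def Claim_equal_schedule_subjects : Prop := ∀ (assignment : List (String × String)), Dom_schedule_subjects assignment → Pre_schedule_subjects assignment → Spec_schedule_subjects assignment (schedule_subjects assignment)

-- ===== LEMMAS AND PROOFS =====

-- the first unassigned subject overall is the first unassigned subject of the remaining suffix
theorem pv_find_of_suffix (rest : List String) (d : PySem.Dict String String)
    (hsuf : rest <:+ pvSubjects)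
    (h1 : ∀ s ∈ pvSubjects, s ∉ rest → d.contains s = true) :
    pvSubjects.find? (fun s => !(d.contains s)) = rest.find? (fun s => !(d.contains s)) := by
  obtain ⟨pre, hpre⟩ := hsuf
  have hnd : (pre ++ rest).Nodup := by rw [hpre]; decide
  have hdisj := List.disjoint_of_nodup_append hnd
  rw [← hpre, List.find?_append]
  have hnone : pre.find? (fun s => !(d.contains s)) = none := by
    apply List.find?_eq_none.mpr
    intro x hx
    have hxs : x ∈ pvSubjects := by rw [← hpre]; exact List.mem_append_left _ hx
    simp [h1 x hxs (hdisj hx)]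
  simp [hnone]

-- A's is_valid over the conflicts list is exactly "the partner's day is not this day"
theorem pv_valid_eq (s day : String) (d : PySem.Dict String String) (hs : s ∈ pvSubjects) :
    pvIsValid s day d = !(d.get? (pvPartner.getD s "") == some day) := by
  have hs' : s = "maths" ∨ s = "phy" ∨ s = "che" ∨ s = "bio" := by
    simpa [pvSubjects] using hs
  rcases hs' with rfl | rfl | rfl | rfl
  · rw [(by decide : pvPartner.getD "maths" "" = "phy")]; simp [pvIsValid, pvConflicts]
  · rw [(by decide : pvPartner.getD "phy" "" = "maths")]; simp [pvIsValid, pvConflicts]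
  · rw [(by decide : pvPartner.getD "che" "" = "bio")]; simp [pvIsValid, pvConflicts]
  · rw [(by decide : pvPartner.getD "bio" "" = "che")]; simp [pvIsValid, pvConflicts]

-- with at most 4 (distinct) keys, size plus the number of unassigned subjects is at least 4
theorem pv_count (a : List (String × String)) (_hnd : (a.map Prod.fst).Nodup) :
    4 ≤ (PySem.Dict.mk a).size +
        (pvSubjects.filter (fun s => !((PySem.Dict.mk a).contains s))).length := by
  have hsub : (pvSubjects.filter (fun s => (PySem.Dict.mk a).contains s)) ⊆ a.map Prod.fst := by
    intro x hx
    have hc := (List.mem_filter.mp hx).2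
    rw [PySem.Dict.contains_eq_decide_mem_keys] at hc
    simpa using of_decide_eq_true hc
  have h1 : (pvSubjects.filter (fun s => (PySem.Dict.mk a).contains s)).length ≤ (a.map Prod.fst).length :=
    (List.subperm_of_subset ((by decide : pvSubjects.Nodup).filter _) hsub).length_le
  have h2 := List.length_eq_length_filter_add (l := pvSubjects) (f := fun s => (PySem.Dict.mk a).contains s)
  have h3 : (PySem.Dict.mk a).size = a.length := by simp [PySem.Dict.size]
  have h4 : (a.map Prod.fst).length = a.length := by simp
  simp only [pvSubjects] at h1 h2 ⊢
  simp only [List.length_cons, List.length_nil] at h2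
  omega

theorem main_lemma : ∀ (rest : List String) (n : Nat) (d : PySem.Dict String String),
    rest.length < n →
    rest <:+ pvSubjects →
    (∀ s ∈ pvSubjects, s ∉ rest → d.contains s = true) →
    d.keys.Nodup →
    d.size ≤ 4 →
    4 ≤ d.size + (rest.filter (fun s => !(d.contains s))).length →
    pvScheduleA n d = some (pvFill d rest) ∧ (pvFill d rest).size = 4 := by
  intro rest
  induction rest with
  | nil =>
    intro n d hn _ _ _ hle hge
    simp only [List.filter_nil, List.length_nil, Nat.add_zero] at hge
    have h4 : d.size = 4 := le_antisymm hle hge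
    obtain ⟨m, rfl⟩ : ∃ m, n = m + 1 := ⟨n - 1, by omega⟩
    exact ⟨by simp [pvScheduleA, pvFill, h4], by simp [pvFill, h4]⟩
  | cons s rest ih =>
    intro n d hn hsuf h1 hnodup hle hge
    obtain ⟨m, rfl⟩ : ∃ m, n = m + 1 := ⟨n - 1, by omega⟩
    have hsub : s ∈ pvSubjects := hsuf.subset (List.mem_cons_self)
    have hsuf' : rest <:+ pvSubjects := by
      obtain ⟨pre, hpre⟩ := hsuf
      exact ⟨pre ++ [s], by simpa using hpre⟩
    by_cases h4 : d.size = 4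
    · exact ⟨by simp [pvScheduleA, pvFill, h4], by simp [pvFill, h4]⟩
    · by_cases hc : d.contains s = true
      · -- 'continue' case: s already assigned
        have h1' : ∀ x ∈ pvSubjects, x ∉ rest → d.contains x = true := by
          intro x hx hxr
          by_cases hxs : x = s
          · exact hxs ▸ hc
          · exact h1 x hx (by simp [hxs, hxr])
        have hge' : 4 ≤ d.size + (rest.filter (fun x => !(d.contains x))).length := by
          rwa [List.filter_cons_of_neg (by simp [hc])] at hge
        have hn' : rest.length < m + 1 := by simp at hn; omega
        obtain ⟨hA, hS⟩ := ih (m + 1) d hn' hsuf' h1' hnodup hle hge'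
        have hF : pvFill d (s :: rest) = pvFill d rest := by
          simp only [pvFill]
          rw [if_neg (by simp [h4]), if_pos hc]
        exact ⟨hF ▸ hA, hF ▸ hS⟩
      · -- assign s
        have hcf : d.contains s = false := by simpa using hc
        have hfind : pvSubjects.find? (fun x => !(d.contains x)) = some s := by
          rw [pv_find_of_suffix _ d hsuf h1]
          exact List.find?_cons_of_pos (by simp [hcf])
        have hrest_nodup : s ∉ rest := by
          have hnd2 : (s :: rest).Nodup := hsuf.sublist.nodup (by decide)
          exact (List.nodup_cons.mp hnd2).1
        have hstep : ∀ day, pvScheduleA m (d.insert s day) = some (pvFill (d.insert s day) rest) ∧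
            (pvFill (d.insert s day) rest).size = 4 := by
          intro day
          have hsz : (d.insert s day).size = d.size + 1 := by
            simp [PySem.Dict.size_insert, hcf]
          have hfil : rest.filter (fun x => !((d.insert s day).contains x)) =
              rest.filter (fun x => !(d.contains x)) := by
            apply List.filter_congr
            intro x hx
            have hxs : (x == s) = false := by
              simp only [beq_eq_false_iff_ne, ne_eq]
              exact fun h => hrest_nodup (h ▸ hx)
            simp [PySem.Dict.contains_insert, hxs]
          apply ih m (d.insert s day) (by simp at hn; omega) hsuf'
          · intro x hx hxr
            by_cases hxs : x = s
            · subst hxs; exact PySem.Dict.contains_insert_self d x day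
            · rw [PySem.Dict.contains_insert]
              simp [h1 x hx (by simp [hxs, hxr])]
          · exact PySem.Dict.nodup_keys_insert d s day hnodup
          · omega
          · rw [hsz, hfil]
            rw [List.filter_cons_of_pos (by simp [hcf])] at hge
            simp only [List.length_cons] at hge
            omega
        have hA4 : pvScheduleA (m + 1) d = pvTryDays (pvScheduleA m) s pvDays d := by
          simp only [pvScheduleA]
          rw [if_neg (by simp [h4]), hfind]
          rfl
        have hBpre : ∀ dayFound, pvDays.find? (fun day => !(d.get? (pvPartner.getD s "") == some day)) = some dayFound →
            pvFill d (s :: rest) = pvFill (d.insert s dayFound) rest := by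
          intro dayFound hdf
          simp only [pvFill]
          rw [if_neg (by simp [h4]), if_neg (by simp [hcf]), hdf]
        by_cases hM : (d.get? (pvPartner.getD s "") == some "Monday") = true
        · -- Monday is the partner's day: Tuesday is chosen
          have hMv : d.get? (pvPartner.getD s "") = some "Monday" := eq_of_beq hM
          have hT : (d.get? (pvPartner.getD s "") == some "Tuesday") = false := by
            rw [hMv]; decide
          obtain ⟨hA, hS⟩ := hstep "Tuesday"
          have hdf : pvDays.find? (fun day => !(d.get? (pvPartner.getD s "") == some day)) = some "Tuesday" := by
            simp only [pvDays]
            rw [List.find?_cons_of_neg (by simp [hM]), List.find?_cons_of_pos (by simp [hT])]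
          have hB := hBpre "Tuesday" hdf
          refine ⟨?_, hB ▸ hS⟩
          rw [hA4, hB]
          simp only [pvDays, pvTryDays]
          rw [if_neg (by rw [pv_valid_eq s "Monday" d hsub]; simp [hM]),
              if_pos (by rw [pv_valid_eq s "Tuesday" d hsub]; simp [hT])]
          rw [hA]
          simp [hS]
        · -- Monday is free: Monday is chosen
          have hMf : (d.get? (pvPartner.getD s "") == some "Monday") = false := by
            simpa using hM
          obtain ⟨hA, hS⟩ := hstep "Monday"
          have hdf : pvDays.find? (fun day => !(d.get? (pvPartner.getD s "") == some day)) = some "Monday" := by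
            simp only [pvDays]
            rw [List.find?_cons_of_pos (by simp [hMf])]
          have hB := hBpre "Monday" hdf
          refine ⟨?_, hB ▸ hS⟩
          rw [hA4, hB]
          simp only [pvDays, pvTryDays]
          rw [if_pos (by rw [pv_valid_eq s "Monday" d hsub]; simp [hMf])]
          rw [hA]
          simp [hS]

-- ===== VERDICT (by name: the statement is the Claim_ definition above) =====
theorem schedule_subjects_spec : Claim_equal_schedule_subjects := by
  intro a _ hpre
  obtain ⟨hnd, hlen⟩ := hpre
  show schedule_subjects a = schedule_subjects_alt a
  have hkeys : (PySem.Dict.mk a).keys.Nodup := by simpa using hnd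
  have hsz : (PySem.Dict.mk a).size = a.length := by simp [PySem.Dict.size]
  obtain ⟨hA, hS⟩ := main_lemma pvSubjects 10 (PySem.Dict.mk a)
    (by decide) (List.suffix_refl _)
    (fun s hs hns => absurd hs hns) hkeys (by omega) (pv_count a hnd)
  unfold schedule_subjects schedule_subjects_alt
  rw [hA]
  simp [hS]
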